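-- pv_equiv track=rewrite | github.com/zacczakk/acsync | scripts/generate-docs.py | parse_doc_frontmatter
-- ===== SOURCE A (Python) =====
-- def parse_doc_frontmatter(text: str) -> tuple[str | None, list[str], str | None]:
--     """Extract summary and read_when from YAML-style front-matter.
--
--     Returns (summary, read_when_list, error).
--     """
--     if not text.startswith("---"):
--         return None, [], "missing front matter"
--
--     end = text.find("\n---", 3)
--     if end == -1:
--         return None, [], "unterminated front matter"
--
--     fm = text[3:end].strip()
--     summary: str | None = None
--     read_when: list[str] = []
--     collecting_rw = False
--
--     for line in fm.splitlines():
--         stripped = line.strip()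
--
--         if stripped.startswith("summary:"):
--             value = stripped[len("summary:") :].strip().strip("\"'")
--             summary = value if value else None
--             collecting_rw = False
--             continue
--
--         if stripped.startswith("read_when:"):
--             collecting_rw = True
--             inline = stripped[len("read_when:") :].strip()
--             if inline.startswith("[") and inline.endswith("]"):
--                 items = [
--                     s.strip().strip("\"'") for s in inline[1:-1].split(",") if s.strip()
--                 ]
--                 read_when.extend(items)
--             continue
--
--         if collecting_rw:
--             if stripped.startswith("- "):
--                 hint = stripped[2:].strip().strip("\"'")
--                 if hint:
--                     read_when.append(hint)
--             elif stripped == "":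
--                 pass
--             else:
--                 collecting_rw = False
--
--     if summary is None:
--         return None, read_when, "summary key missing"
--     return summary, read_when, None
-- ===== SOURCE B (Python) =====
-- def parse_doc_frontmatter(text: str) -> tuple:
--     """Index-based re-implementation: an outer while over lines; a `read_when:` line
--     triggers an inner loop that consumes the following `- ` / blank lines, instead of
--     A's persistent collecting flag."""
--     if not text.startswith("---"):
--         return None, [], "missing front matter"
--     end = text.find("\n---", 3)
--     if end == -1:
--         return None, [], "unterminated front matter"
--     lines = text[3:end].strip().splitlines()
--     summary = None
--     read_when = []
--     i = 0
--     n = len(lines)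
--     while i < n:
--         stripped = lines[i].strip()
--         i += 1
--         if stripped.startswith("summary:"):
--             value = stripped[len("summary:"):].strip().strip("\"'")
--             summary = value if value else None
--         elif stripped.startswith("read_when:"):
--             inline = stripped[len("read_when:"):].strip()
--             if inline.startswith("[") and inline.endswith("]"):
--                 read_when.extend(
--                     s.strip().strip("\"'") for s in inline[1:-1].split(",") if s.strip()
--                 )
--             # consume the indented block that follows; break lets the outer loop
--             # reprocess the first line that is neither a hint nor blank
--             while i < n:
--                 nxt = lines[i].strip()
--                 if nxt.startswith("- "):
--                     hint = nxt[2:].strip().strip("\"'")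
--                     if hint:
--                         read_when.append(hint)
--                 elif nxt != "":
--                     break
--                 i += 1
--     if summary is None:
--         return None, read_when, "summary key missing"
--     return summary, read_when, None
-- ===== Notes on version B (the rewrite author's own statement) =====
-- stated objective: alternative
-- what changed: Replaces A's single loop with a persistent collecting_rw flag by an index-based outer loop plus an inner loop that consumes the dash/blank block following each read_when: line and breaks so the outer loop reprocesses the stopping line.
import Mathlib
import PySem

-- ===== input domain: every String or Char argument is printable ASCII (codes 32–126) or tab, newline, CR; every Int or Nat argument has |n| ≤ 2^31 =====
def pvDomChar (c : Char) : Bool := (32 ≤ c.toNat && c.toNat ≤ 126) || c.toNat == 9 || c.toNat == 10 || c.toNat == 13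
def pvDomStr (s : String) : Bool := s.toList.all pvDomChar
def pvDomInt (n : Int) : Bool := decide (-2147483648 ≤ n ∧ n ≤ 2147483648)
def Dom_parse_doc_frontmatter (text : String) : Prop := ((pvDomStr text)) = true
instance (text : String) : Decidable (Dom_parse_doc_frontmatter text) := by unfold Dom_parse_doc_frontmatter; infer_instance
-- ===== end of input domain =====

-- B replaces A's persistent `collecting_rw` flag with an index-style outer loop and an inner
-- loop that consumes the dash/blank block after each `read_when:` line (objective: alternative
-- decomposition, same cost).

-- shared helpers: the same line-level expressions both Pythons contain
def pvStripQuotes (s : String) : String := PySem.Str.stripChars s "\"'"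

-- [s.strip().strip("\"'") for s in inline[1:-1].split(",") if s.strip()]
def pvInlineItems (inline : String) : List String :=
  (((PySem.Chars.splitOn (PySem.Str.slice inline (some 1) (some (-1))).toList [',']).map
      (fun cs => PySem.Str.strip (String.ofList cs))).filter (fun s => !(s == ""))).map pvStripQuotes

-- ===== PORT A =====
-- loop body; state: (summary, read_when, collecting_rw)
def pvStepA (st : Option String × List String × Bool) (line : String) :
    Option String × List String × Bool :=
  let stripped := PySem.Str.strip line
  if PySem.Str.startswith stripped "summary:" then
    let value := pvStripQuotes (PySem.Str.strip (PySem.Str.slice stripped (some 8) none))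
    (if value == "" then none else some value, st.2.1, false)
  else if PySem.Str.startswith stripped "read_when:" then
    let inline := PySem.Str.strip (PySem.Str.slice stripped (some 10) none)
    (st.1,
     if PySem.Str.startswith inline "[" && PySem.Str.endswith inline "]" then
       st.2.1 ++ pvInlineItems inline
     else st.2.1,
     true)
  else if st.2.2 then
    if PySem.Str.startswith stripped "- " then
      let hint := pvStripQuotes (PySem.Str.strip (PySem.Str.slice stripped (some 2) none))
      (st.1, if hint == "" then st.2.1 else st.2.1 ++ [hint], st.2.2)
    else if stripped == "" then st
    else (st.1, st.2.1, false)
  else st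

def parse_doc_frontmatter (text : String) : Option String × List String × Option String :=
  if !(PySem.Str.startswith text "---") then (none, [], some "missing front matter")
  else if PySem.Str.findFrom text "\n---" 3 == -1 then (none, [], some "unterminated front matter")
  else
    match (PySem.Str.splitlines (PySem.Str.strip
        (PySem.Str.slice text (some 3) (some (PySem.Str.findFrom text "\n---" 3))))).foldl
        pvStepA (none, [], false) with
    | (none, rw, _) => (none, rw, some "summary key missing")
    | (some s, rw, _) => (some s, rw, none)

-- ===== PORT B =====
-- inner loop: consume `- `/blank lines, return (unconsumed lines, extended read_when)
def pvCollect (ls : List String) (rw : List String) : List String × List String :=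
  match ls with
  | [] => ([], rw)
  | l :: t =>
    let nxt := PySem.Str.strip l
    if PySem.Str.startswith nxt "- " then
      let hint := pvStripQuotes (PySem.Str.strip (PySem.Str.slice nxt (some 2) none))
      pvCollect t (if hint == "" then rw else rw ++ [hint])
    else if nxt == "" then pvCollect t rw
    else (l :: t, rw)

-- needed by pvGo's termination: the inner loop never adds lines back
theorem pvCollect_fst_length_le (ls rw : List String) :
    (pvCollect ls rw).1.length ≤ ls.length := by
  induction ls generalizing rw with
  | nil => simp [pvCollect]
  | cons l t ih =>
    simp only [pvCollect]
    split
    · exact le_trans (ih _) (by simp)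
    · split
      · exact le_trans (ih _) (by simp)
      · simp

-- outer loop over the remaining lines
def pvGo (ls : List String) (summary : Option String) (rw : List String) :
    Option String × List String :=
  match ls with
  | [] => (summary, rw)
  | l :: t =>
    let stripped := PySem.Str.strip l
    if PySem.Str.startswith stripped "summary:" then
      let value := pvStripQuotes (PySem.Str.strip (PySem.Str.slice stripped (some 8) none))
      pvGo t (if value == "" then none else some value) rw
    else if PySem.Str.startswith stripped "read_when:" then
      let inline := PySem.Str.strip (PySem.Str.slice stripped (some 10) none)
      let rw' := if PySem.Str.startswith inline "[" && PySem.Str.endswith inline "]" then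
          rw ++ pvInlineItems inline
        else rw
      pvGo (pvCollect t rw').1 summary (pvCollect t rw').2
    else pvGo t summary rw
termination_by ls.length
decreasing_by
  · simp
  · exact Nat.lt_succ_of_le (pvCollect_fst_length_le _ _)
  · simp

def parse_doc_frontmatter_alt (text : String) : Option String × List String × Option String :=
  if !(PySem.Str.startswith text "---") then (none, [], some "missing front matter")
  else if PySem.Str.findFrom text "\n---" 3 == -1 then (none, [], some "unterminated front matter")
  else
    match pvGo (PySem.Str.splitlines (PySem.Str.strip
        (PySem.Str.slice text (some 3) (some (PySem.Str.findFrom text "\n---" 3))))) none [] with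
    | (none, rw) => (none, rw, some "summary key missing")
    | (some s, rw) => (some s, rw, none)

-- ===== PRECONDITION & SPEC =====
def Spec_parse_doc_frontmatter (text : String) (out : Option String × List String × Option String) : Prop := out = parse_doc_frontmatter_alt text
instance (text : String) (out : Option String × List String × Option String) : Decidable (Spec_parse_doc_frontmatter text out) := by unfold Spec_parse_doc_frontmatter; infer_instance

-- ===== CLAIM (what is proved, stated in full; the proofs are below) =====
def Claim_equal_parse_doc_frontmatter : Prop := ∀ (text : String), Dom_parse_doc_frontmatter text → Spec_parse_doc_frontmatter text (parse_doc_frontmatter text)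

-- ===== LEMMAS AND PROOFS =====

-- final (summary, read_when) of A's fold from a given state
def pvFin (st : Option String × List String × Bool) (ls : List String) : Option String × List String :=
  ((ls.foldl pvStepA st).1, (ls.foldl pvStepA st).2.1)

theorem pvFin_nil (st : Option String × List String × Bool) : pvFin st [] = (st.1, st.2.1) := rfl

theorem pvFin_cons (st : Option String × List String × Bool) (l : String) (t : List String) :
    pvFin st (l :: t) = pvFin (pvStepA st l) t := rfl

theorem pv_prefix_head {a b : Char} {p q l : List Char}
    (h1 : (a :: p).isPrefixOf l = true) (h2 : (b :: q).isPrefixOf l = true) : a = b := by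
  cases l with
  | nil => simp [List.isPrefixOf] at h1
  | cons x xs =>
    simp [List.isPrefixOf] at h1 h2
    exact h1.1.trans h2.1.symm

theorem pv_sw_nil (c : Char) (cs : List Char) :
    PySem.Chars.startswith [] (c :: cs) = false := rfl

theorem pv_dash_not_summary (cs : List Char)
    (h : PySem.Chars.startswith cs ['-', ' '] = true) :
    PySem.Chars.startswith cs ['s', 'u', 'm', 'm', 'a', 'r', 'y', ':'] = false := by
  simp only [PySem.Chars.startswith] at *
  by_contra hx
  rw [Bool.not_eq_false] at hx
  exact absurd (pv_prefix_head h hx) (by decide)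

theorem pv_dash_not_readwhen (cs : List Char)
    (h : PySem.Chars.startswith cs ['-', ' '] = true) :
    PySem.Chars.startswith cs ['r', 'e', 'a', 'd', '_', 'w', 'h', 'e', 'n', ':'] = false := by
  simp only [PySem.Chars.startswith] at *
  by_contra hx
  rw [Bool.not_eq_false] at hx
  exact absurd (pv_prefix_head h hx) (by decide)

-- A's fold with the flag ON: consume the block, then continue with the flag off
theorem pvFin_true (ls : List String) (s : Option String) (rw : List String) :
    pvFin (s, rw, true) ls = pvFin (s, (pvCollect ls rw).2, false) (pvCollect ls rw).1 := by
  induction ls generalizing rw with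
  | nil => simp [pvCollect, pvFin_nil]
  | cons l t ih =>
    by_cases hd : PySem.Chars.startswith (PySem.Chars.strip l.toList) ['-', ' '] = true
    · have hs := pv_dash_not_summary _ hd
      have hr := pv_dash_not_readwhen _ hd
      rw [pvFin_cons]
      simp [pvStepA, pvCollect, hs, hr, hd]
      exact ih _
    · by_cases hb : PySem.Str.strip l = ""
      · rw [pvFin_cons]
        simp [pvStepA, pvCollect, hb, pv_sw_nil]
        exact ih _
      · rw [show pvCollect (l :: t) rw = (l :: t, rw) from by
          simp [pvCollect, hd, hb]]
        rw [pvFin_cons, pvFin_cons]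
        by_cases h1 : PySem.Chars.startswith (PySem.Chars.strip l.toList)
            ['s', 'u', 'm', 'm', 'a', 'r', 'y', ':'] = true
        · simp [pvStepA, h1]
        · by_cases h2 : PySem.Chars.startswith (PySem.Chars.strip l.toList)
              ['r', 'e', 'a', 'd', '_', 'w', 'h', 'e', 'n', ':'] = true
          · simp [pvStepA, h1, h2]
          · simp [pvStepA, h1, h2, hd, hb]

-- A's fold with the flag off is B's outer loop
theorem pvFin_false (ls : List String) (s : Option String) (rw : List String) :
    pvFin (s, rw, false) ls = pvGo ls s rw := by
  match ls with
  | [] => simp [pvFin_nil, pvGo]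
  | l :: t =>
    rw [pvFin_cons, pvGo]
    by_cases h1 : PySem.Chars.startswith (PySem.Chars.strip l.toList)
        ['s', 'u', 'm', 'm', 'a', 'r', 'y', ':'] = true
    · simp [pvStepA, h1]
      exact pvFin_false t _ rw
    · by_cases h2 : PySem.Chars.startswith (PySem.Chars.strip l.toList)
          ['r', 'e', 'a', 'd', '_', 'w', 'h', 'e', 'n', ':'] = true
      · simp [pvStepA, h1, h2]
        rw [pvFin_true]
        exact pvFin_false _ s _
      · simp [pvStepA, h1, h2]
        exact pvFin_false t s rw
termination_by ls.length
decreasing_by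
  · simp
  · exact Nat.lt_succ_of_le (pvCollect_fst_length_le _ _)
  · simp

-- ===== VERDICT (by name: the statement is the Claim_ definition above) =====
theorem parse_doc_frontmatter_spec : Claim_equal_parse_doc_frontmatter := by
  intro text _
  unfold Spec_parse_doc_frontmatter parse_doc_frontmatter parse_doc_frontmatter_alt
  split
  · rfl
  · split
    · rfl
    · have h := pvFin_false (PySem.Str.splitlines (PySem.Str.strip
        (PySem.Str.slice text (some 3) (some (PySem.Str.findFrom text "\n---" 3))))) none []
      unfold pvFin at h
      rw [← h]
      rcases hfold : (PySem.Str.splitlines (PySem.Str.strip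
        (PySem.Str.slice text (some 3) (some (PySem.Str.findFrom text "\n---" 3))))).foldl
        pvStepA (none, [], false) with ⟨s1, rw1, fl1⟩
      cases s1 <;> rfl
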